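/-
  fixed/jsmn_d.bin: **THE CHECKING `jsmn_parse`** (95 bytes at 100555H, 31 instructions, no loop, one call) **computes `Jsmn.parseFixed`** —
  for every parser struct and every token array of `num_tokens` entries: NO precondition on the parser's fields, no fuel.
    the six failed checks   → `mov eax, -2 ; ret` with memory untouched = `parseFixed`'s else-branch (`argsOk = false`: the branch fact says which conjunct fails)
    all checks passed       → `argsOk = true`, so `argsOk_inv` gives the body's precondition `Inv`; `call jsmn_parse_core` through its contract
                              (`CoreSpec binFDc n` = the original's ParseSpec on the fixed image) with `js.length + 1` units of fuel; `ret`.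
  Registers: the wrapper touches only eax and r9d, so the five arguments reach the body where they were.
-/
import Prog.Jsmn.Fixed.CheckLemmas
import Prog.Jsmn.Fixed.CodeFD
import Prog.Jsmn.D.ParseLemmas
import Prog.Jsmn.D.ParseCallLemmas

namespace X86
namespace J6
namespace FD
open X86.User (CodeAt RegsKept Span FlagsOK Layout toNat_add_ofNat toNat_ofNat_lt' add_ofNat_add)
open Jsmn JsmnFDBytes

set_option maxRecDepth 100000
set_option maxHeartbeats 4000000
set_option linter.unusedSimpArgs false
set_option linter.unusedVariables false

variable {n : User.Layout}

set_option hygiene false in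
/-- The end of a failed check: eax = -2, back at the caller, nothing written. `h` proves that the check fails. -/
macro "check_fail " t:term ", " h:term : tactic => `(tactic| (
  have hbad : ¬ argsOk Config.default js.length p $t numTokens = true := $h
  rw [Fx.parseFixed_fail hbad] at hm
  simp only [Option.some.injEq, Prod.mk.injEq] at hm
  obtain ⟨rfl, rfl, rfl⟩ := hm
  refine Reach.done ⟨⟨by simp, by v3_regnorm, RegsKept.saved (S := [.rax, .r9, .rsp]) (by v3_kept) rfl, by v3_same⟩, by unfold RetInt; v3_regnorm; rfl,
    by v3_memnorm; exact hp.parser, by v3_memnorm; exact hp.toksArg⟩))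

set_option hygiene false in
/-- All checks passed (`hok`): `call jsmn_parse_core` through the body's contract, then `ret`. -/
macro "check_pass " t:term : tactic => `(tactic| (
  rw [Fx.parseFixed_pass hok] at hm
  obtain ⟨hinv, hl31, _⟩ := argsOk_inv hty hlen hok
  have hsp8 : (v0.reg .rsp - 8).toNat = (v0.reg .rsp).toNat - 8 := by v3_omega
  refine Reach.trans (hcore _ 0x10058f pa jsA tb js numTokens p $t (js.length + 1) r p' toks'
    ⟨by show CallPre n 0x100000 image_bytes 0x10027a 88 _ _; v3_callpre hp_call_img hp.call, by v3_regnorm; exact hp_rdi, by v3_regnorm; exact hp_rsi, by v3_regnorm; exact hp_rdx, by v3_regnorm; exact hp_rcx, hp.nlt,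
      hp.jslt, by v3_frame hp_text, by v3_frame hp.parser, by show ToksArg Config.default _ tb numTokens $t; v3_frame hp_toksArg,
      Fx.env_sub hp.env rfl (by v3_regnorm; v3_omega) (by decide)⟩ (by v3_regnorm; exact hr8) hinv hm) ?_
  intro v2 hpost
  v3_open hpost
  have hk := hpost.ret.kept
  v3_viewnorm at hpost_ret_rsp hpost_ret_same hpost_ret_rip
  j6f_bin
  unfold dataWins at hpost_ret_same
  rw [hsp8] at hpost_ret_same
  have hcode2 : CodeAt v2.mem 0x100555 jsmn_parse_bytes := by v3_frame hcodeW
  have hret2 : UInt64.ofNat (v2.mem.readLE (v0.reg .rsp) 8) = ret := by v3_frame hp_call_retAddr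
  clear hcodeW
  v3_walk hcode2 hp.call.fetch [hret2, hp_call_retlt]
  refine Reach.done ⟨⟨by simp, by v3_regnorm, calleeSaved_of_six ?_ ?_ ?_ ?_ ?_ ?_, ?_⟩, ?_, ?_, ?_⟩
  iterate 6 (v3_regnorm; rw [hk.get _ rfl]; v3_regnorm)
  · unfold dataWins
    rw [binFD_cfg]
    v3_memnorm
    have h1 : SameOutside v0.mem (v0.mem.writeLE (v0.reg .rsp - 8) 8 1049999)
        [((v0.reg .rsp).toNat - 96, (v0.reg .rsp).toNat), (pa.toNat, pa.toNat + 12),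
          (tb.toNat, tb.toNat + toksBytes Config.default numTokens $t)] := by v3_same
    refine h1.trans (hpost_ret_same.mono ?_)
    intro a ha
    simp only [outside_cons, outside_nil, and_true] at ha ⊢
    omega
  · unfold RetInt; v3_regnorm; exact hpost.rax
  · v3_memnorm; exact hpost.parser
  · v3_memnorm; exact hpost.toks))

/-- **The fixed `jsmn_parse` of fixed/jsmn_d.bin computes `Jsmn.parseFixed`**, given the contract of the unchanged body. -/
theorem parse_fixed_spec (hcore : CoreSpec binFDc n) : ParseSpecFixed binFD n := by
  intro v0 ret pa jsA tb js numTokens p toks r p' toks' hp hr8 hm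
  have hty := typed_of hp.parser hp.nlt
  have hlen := toksArg_len hp.toksArg
  have hW := hp.toksW
  have hr8n : (v0.reg .r8).toNat % 4294967296 = numTokens := by
    have h := congrArg UInt64.toNat hr8
    have := hp.nlt
    v3_omega
  v3_open hp hW
  j6f_bin
  have hcode := JsmnFD.tjfd_jsmn_parse_code hp_call_img
  obtain ⟨hsraw, hslo, hshi⟩ := hp_parser_toksuper
  have htn := hty.toknext
  have hnt := hp.nlt
  unfold u32 at hsraw
  cases toks with
  | none =>
    -- counting mode: only the first `if`
    have htb : tb = 0 := hp_toksArg
    v3_walk hcode hp.call.fetch [hp_call_retAddr, hp_call_retlt]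
    · check_fail none, (fun h => by have := (Fx.argsOk_none_iff _ _ _ _).mp h; v3_omega)
    · have hok : argsOk Config.default js.length p none numTokens = true := (Fx.argsOk_none_iff _ _ _ _).mpr (by v3_omega)
      check_pass none
  | some ts =>
    have htb : tb ≠ 0 := hp_toksArg.1
    have htbn : tb.toNat ≠ 0 := fun h => htb (UInt64.toNat_inj.mp h)
    v3_walk hcode hp.call.fetch [hp_call_retAddr, hp_call_retlt]
    · check_fail (some ts), (fun h => by have := (Fx.argsOk_default_iff _ _ _ _).mp h; v3_omega)
    · check_fail (some ts), (fun h => by have := (Fx.argsOk_default_iff _ _ _ _).mp h; v3_omega)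
    · check_fail (some ts), (fun h => by have := (Fx.argsOk_default_iff _ _ _ _).mp h; v3_omega)
    · check_fail (some ts), (fun h => by have := (Fx.argsOk_default_iff _ _ _ _).mp h; v3_omega)
    · check_fail (some ts), (fun h => by have := (Fx.argsOk_default_iff _ _ _ _).mp h; v3_omega)
    · have hok : argsOk Config.default js.length p (some ts) numTokens = true := (Fx.argsOk_default_iff _ _ _ _).mpr (by v3_omega)
      check_pass (some ts)

end FD
end J6
end X86
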